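-- pv_equiv track=rewrite | github.com/borish3198/Problem_Solving | programmers/무지의 먹방 라이브.py | solution
-- ===== SOURCE A (Python) =====
-- def solution(food_times, k):
--
--     menu = len(food_times)
--     idx = 0
--     z_count = 0
--     while True:
--         if k == -1:
--             break
--         if z_count==menu:
--             answer=-2
--             break
--         if food_times[idx%menu]>0:
--             z_count=0
--             answer = idx%menu
--             food_times[idx%menu]-=1
--             k-=1
--         else:
--             z_count+=1
--         idx+=1
--
--     return answer+1
-- ===== SOURCE B (Python) =====
-- def solution(food_times, k):
--     # Bulk simulation: remove whole "levels" of full round-robin passes at once,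
--     # then locate the answer by position among the surviving dishes.
--     ft = food_times
--     while True:
--         alive = [t for t in ft if t > 0]
--         if not alive:
--             return -1
--         m = len(alive)
--         tmin = min(alive)
--         if k < m * tmin:
--             idx_alive = [i for i, t in enumerate(ft) if t > 0]
--             return idx_alive[k % m] + 1
--         k -= m * tmin
--         ft = [t - tmin if t > 0 else t for t in ft]
-- ===== Notes on version B (the rewrite author's own statement) =====
-- stated objective: faster
-- what changed: A simulates eating second by second (one loop iteration per eaten unit, O(k)); B removes whole levels of full round-robin passes in bulk (k -= m*tmin) and locates the answer among the surviving dishes with k % m, so its work is bounded by the list, not by k. B does not mutate food_times (A empties it in place); return values agree on all k >= 0.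
-- outside the precondition, e.g. on solution([1, 2], -5): A returns -1, B returns 2; on solution([2], -1): A raises UnboundLocalError, B returns 1
import Mathlib
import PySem

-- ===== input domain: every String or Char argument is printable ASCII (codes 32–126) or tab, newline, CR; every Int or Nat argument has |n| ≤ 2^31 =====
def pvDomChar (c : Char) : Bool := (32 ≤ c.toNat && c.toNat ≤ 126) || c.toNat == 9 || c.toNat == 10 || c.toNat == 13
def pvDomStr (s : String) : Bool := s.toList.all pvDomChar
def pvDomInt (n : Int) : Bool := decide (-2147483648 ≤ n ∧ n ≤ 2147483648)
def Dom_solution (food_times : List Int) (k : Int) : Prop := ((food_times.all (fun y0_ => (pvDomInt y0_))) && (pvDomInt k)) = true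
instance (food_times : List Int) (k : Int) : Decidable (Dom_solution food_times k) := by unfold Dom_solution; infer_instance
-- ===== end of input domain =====

-- B replaces A's second-by-second simulation by bulk removal of whole round-robin levels (faster: work
-- bounded by the list, not by k). A mutates food_times in place (B does not): the equivalence proved
-- here is about the RETURN value only.

-- ===== PORT A =====
-- Python A's 'while True' loop as a fueled recursion; the fuel provably exceeds the iteration count for
-- every k ≥ 0 (proved in the lemmas below), so on admitted inputs the fuel-0 branch is never taken.
-- 'food_times[idx % menu]' is read only when menu ≥ 1, hence in range: 'getD j 0' is exact there.
-- Python's 'answer' is unbound before the first eat and only read at k = -1 (outside Pre_, where A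
-- raises UnboundLocalError); the initial 'ans := 0' is never returned on admitted inputs.
def loopA (menu : Nat) (ft : List Int) (k : Int) (idx : Nat) (z : Nat) (ans : Int) : Nat → Int
  | 0 => ans + 1
  | fuel + 1 =>
    if k = -1 then ans + 1
    else if z = menu then (-2 : Int) + 1
    else
      let j := idx % menu
      if 0 < ft.getD j 0 then
        loopA menu (ft.set j (ft.getD j 0 - 1)) (k - 1) (idx + 1) 0 (j : Int) fuel
      else
        loopA menu ft k (idx + 1) (z + 1) ans fuel

def solution (food_times : List Int) (k : Int) : Int :=
  loopA food_times.length food_times k 0 0 0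
    (((k + 1).toNat + food_times.foldl (fun s t => s + t.toNat) 0 + 1) *
      (food_times.length + 1) + food_times.length + 1)

-- ===== PORT B =====
-- Source B's 'while True' loop; each recursive step strictly decreases the total positive food, so
-- 'posFuel' (total positive food + 1) bounds the iteration count on every input.
def posFuel (ft : List Int) : Nat := ft.foldl (fun s t => s + t.toNat) 0 + 1

def loopB (ft : List Int) (k : Int) : Nat → Int
  | 0 => -1
  | fuel + 1 =>
    let alive := ft.filter (fun t => decide (0 < t))
    if alive = [] then -1
    else
      let m : Int := (alive.length : Int)
      let tmin : Int := (PySem.List.min? alive (fun x => x)).getD 0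
      if k < m * tmin then
        -- idx_alive[k % m]: the index 'k % m' is provably in range (0 ≤ k % m < m = len), so
        -- Python's IndexError is impossible and '.getD 0' is exact.
        let idx_alive : List Int :=
          (PySem.List.enumerate ft).filterMap (fun p => if 0 < p.2 then some p.1 else none)
        (PySem.List.pyGet? idx_alive (PySem.Int.mod k m)).getD 0 + 1
      else
        loopB (ft.map (fun t => if 0 < t then t - tmin else t)) (k - m * tmin) fuel

def solution_alt (food_times : List Int) (k : Int) : Int :=
  loopB food_times k (posFuel food_times)

-- ===== PRECONDITION & SPEC =====
-- Pre_ excludes negative k (a negative number of seconds, outside the problem's natural domain): at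
-- k = -1 Python A raises UnboundLocalError, and for k ≤ -2 its returned -1 ('everything eaten') is an
-- accident of the loop's sentinel, which B's own algorithm never produces there.
def Pre_solution (food_times : List Int) (k : Int) : Prop := 0 ≤ k
instance (food_times : List Int) (k : Int) : Decidable (Pre_solution food_times k) := by
  unfold Pre_solution; infer_instance

def pvWitness_solution : List Int × Int := ([3, 1, 2], 5)

def Spec_solution (food_times : List Int) (k : Int) (out : Int) : Prop := out = solution_alt food_times k
instance (food_times : List Int) (k : Int) (out : Int) : Decidable (Spec_solution food_times k out) := by
  unfold Spec_solution; infer_instance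

-- ===== CLAIM (what is proved, stated in full; the proofs are below) =====
def Claim_equal_solution : Prop := ∀ (food_times : List Int) (k : Int), Dom_solution food_times k → Pre_solution food_times k → Spec_solution food_times k (solution food_times k)

-- ===== LEMMAS AND PROOFS =====

-- total positive food
def posS (ts : List Int) : Nat := (ts.map Int.toNat).sum
-- number of positive entries
def cntL (ts : List Int) : Nat := (ts.filter (fun t => decide (0 < t))).length
-- one round-robin pass decrements every positive entry
def decL (ts : List Int) : List Int := ts.map (fun t => if 0 < t then t - 1 else t)
-- index of the (r+1)-th positive entry
def nthPosL : List Int → Nat → Nat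
  | [], _ => 0
  | t :: ts, r => if 0 < t then (if r = 0 then 0 else nthPosL ts (r - 1) + 1) else nthPosL ts r + 1

-- one pass over a suffix: either the answer offset, or the suffix after the pass and the remaining k
def Q : List Int → Int → (Nat ⊕ (List Int × Int))
  | [], k => .inr ([], k)
  | t :: ts, k =>
    if 0 < t then
      if k = 0 then .inl 0
      else match Q ts (k - 1) with
        | .inl o => .inl (o + 1)
        | .inr (us, k') => .inr ((t - 1) :: us, k')
    else match Q ts k with
      | .inl o => .inl (o + 1)
      | .inr (us, k') => .inr (t :: us, k')

-- the boundary model: repeat passes until an answer (fueled; posS+1 suffices)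
def M0 : Nat → List Int → Int → Int
  | 0, _, _ => -1
  | fuel + 1, ft, k =>
    if ft.any (fun t => decide (0 < t)) then
      match Q ft k with
      | .inl o => (o : Int) + 1
      | .inr (us, k') => M0 fuel us k'
    else -1

def M0b (ft : List Int) (k : Int) : Int := M0 (posS ft + 1) ft k

theorem Q_char (ts : List Int) : ∀ k : Int, 0 ≤ k →
    Q ts k = if k < (cntL ts : Int) then .inl (nthPosL ts k.toNat)
             else .inr (decL ts, k - (cntL ts : Int)) := by
  induction ts with
  | nil =>
    intro k hk
    simp [Q, cntL, decL]
    omega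
  | cons t ts ih =>
    intro k hk
    by_cases ht : 0 < t
    · by_cases hk0 : k = 0
      · subst hk0
        have h1 : cntL (t :: ts) ≠ 0 := by
          simp [cntL, ht]
        have h1' : (0 : Int) < (cntL (t :: ts) : Int) := by omega
        simp [Q, ht, nthPosL, h1', h1]
      · have hk1 : 0 ≤ k - 1 := by omega
        rw [show Q (t :: ts) k = (match Q ts (k - 1) with
          | .inl o => .inl (o + 1)
          | .inr (us, k') => .inr ((t - 1) :: us, k')) by simp [Q, ht, hk0]]
        rw [ih (k - 1) hk1]
        have hcnt : cntL (t :: ts) = cntL ts + 1 := by simp [cntL, ht]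
        by_cases hlt : k - 1 < (cntL ts : Int)
        · have hlt' : k < (cntL (t :: ts) : Int) := by rw [hcnt]; push_cast; omega
          simp only [hlt, if_true, hlt', if_true]
          have : nthPosL (t :: ts) k.toNat = nthPosL ts (k.toNat - 1) + 1 := by
            simp [nthPosL, ht, show k.toNat ≠ 0 by omega]
          rw [this, show (k - 1).toNat = k.toNat - 1 by omega]
        · have hlt' : ¬ k < (cntL (t :: ts) : Int) := by rw [hcnt]; push_cast; omega
          simp only [hlt, if_false, hlt', if_false]
          rw [hcnt]
          have h2 : (t - 1) :: decL ts = decL (t :: ts) := by simp [decL, ht]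
          rw [h2]
          congr 1
          push_cast; ring_nf
    · rw [show Q (t :: ts) k = (match Q ts k with
        | .inl o => .inl (o + 1)
        | .inr (us, k') => .inr (t :: us, k')) by simp [Q, ht]]
      rw [ih k hk]
      have hcnt : cntL (t :: ts) = cntL ts := by simp [cntL, ht]
      by_cases hlt : k < (cntL ts : Int)
      · simp only [hlt, if_true, hcnt, hlt, if_true]
        simp [nthPosL, ht]
      · simp only [hlt, if_false, hcnt, if_false]
        simp [decL, ht]

theorem any_iff_cntL (ft : List Int) :
    ft.any (fun t => decide (0 < t)) = true ↔ cntL ft ≠ 0 := by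
  simp [cntL, List.length_eq_zero_iff, List.filter_eq_nil_iff, List.any_eq_true]

theorem posS_decL (ft : List Int) : posS (decL ft) + cntL ft = posS ft := by
  induction ft with
  | nil => simp [posS, decL, cntL]
  | cons t ts ih =>
    have e2 : posS (t :: ts) = t.toNat + posS ts := by simp [posS]
    by_cases ht : 0 < t
    · have e1 : posS (decL (t :: ts)) = (t - 1).toNat + posS (decL ts) := by
        simp [posS, decL, ht]
      have e3 : cntL (t :: ts) = cntL ts + 1 := by simp [cntL, ht]
      rw [e1, e2, e3]; omega
    · have e1 : posS (decL (t :: ts)) = t.toNat + posS (decL ts) := by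
        simp [posS, decL, ht]
      have e3 : cntL (t :: ts) = cntL ts := by simp [cntL, ht]
      rw [e1, e2, e3]; omega

theorem decL_of_nopos (ft : List Int) (h : cntL ft = 0) : decL ft = ft := by
  have h' : ∀ t ∈ ft, ¬ 0 < t := by
    simpa [cntL, List.length_eq_zero_iff, List.filter_eq_nil_iff] using h
  have he : ∀ t ∈ ft, (if 0 < t then t - 1 else t) = t := fun t ht => by simp [h' t ht]
  unfold decL
  rw [List.map_congr_left he, List.map_id']

theorem M0_nopos (fuel : Nat) (ft : List Int) (k : Int) (h : cntL ft = 0) :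
    M0 (fuel + 1) ft k = -1 := by
  have : ft.any (fun t => decide (0 < t)) = false := by
    rw [← Bool.not_eq_true, any_iff_cntL]; omega
  simp [M0, this]

theorem M0_fuel (fuel : Nat) : ∀ (ft : List Int) (k : Int), 0 ≤ k → posS ft + 1 ≤ fuel →
    M0 fuel ft k = M0b ft k := by
  induction fuel using Nat.strong_induction_on with
  | _ fuel ih =>
    intro ft k hk hf
    match fuel, hf with
    | fuel + 1, hf =>
      by_cases hp : cntL ft = 0
      · rw [M0_nopos, M0b, M0_nopos] <;> assumption
      · have hany : ft.any (fun t => decide (0 < t)) = true := (any_iff_cntL ft).2 hp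
        rw [show M0 (fuel + 1) ft k = (match Q ft k with
              | .inl o => (o : Int) + 1
              | .inr (us, k') => M0 fuel us k') by simp [M0, hany]]
        rw [show M0b ft k = (match Q ft k with
              | .inl o => (o : Int) + 1
              | .inr (us, k') => M0 (posS ft) us k') by simp [M0b, M0, hany]]
        rw [Q_char ft k hk]
        by_cases hlt : k < (cntL ft : Int)
        · simp [hlt]
        · simp only [hlt, if_false]
          have hps : posS (decL ft) + 1 ≤ posS ft := by
            have := posS_decL ft; omega
          rw [ih fuel (by omega) (decL ft) _ (by omega) (by omega),
              ih (posS ft) (by omega) (decL ft) _ (by omega) hps]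

theorem M0b_unfold (ft : List Int) (k : Int) (hk : 0 ≤ k) :
    M0b ft k = if ft.any (fun t => decide (0 < t)) then
        (match Q ft k with
         | .inl o => (o : Int) + 1
         | .inr (us, k') => M0b us k')
      else -1 := by
  by_cases hp : cntL ft = 0
  · have : ft.any (fun t => decide (0 < t)) = false := by
      rw [← Bool.not_eq_true, any_iff_cntL]; omega
    rw [M0b, M0_nopos _ _ _ hp, this]
    simp
  · have hany : ft.any (fun t => decide (0 < t)) = true := (any_iff_cntL ft).2 hp
    rw [show M0b ft k = (match Q ft k with
          | .inl o => (o : Int) + 1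
          | .inr (us, k') => M0 (posS ft) us k') by simp [M0b, M0, hany], hany]
    simp only [if_true]
    rw [Q_char ft k hk]
    by_cases hlt : k < (cntL ft : Int)
    · simp [hlt]
    · simp only [hlt, if_false]
      have hps : posS (decL ft) + 1 ≤ posS ft := by
        have := posS_decL ft; omega
      rw [M0_fuel (posS ft) (decL ft) _ (by omega) hps]

-- the result of a full pass folded back into the boundary model
theorem Q_to_M0b (ft : List Int) (k : Int) (hk : 0 ≤ k) :
    (match Q ft k with
     | .inl o => (o : Int) + 1
     | .inr (us, k') => M0b us k') = M0b ft k := by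
  by_cases hp : cntL ft = 0
  · rw [Q_char ft k hk]
    have hlt : ¬ k < (cntL ft : Int) := by omega
    simp only [hlt, if_false]
    rw [decL_of_nopos ft hp, hp]
    simp
  · rw [M0b_unfold ft k hk, (any_iff_cntL ft).2 hp]
    simp

theorem getD_mid (pre : List Int) (t : Int) (suf : List Int) :
    (pre ++ t :: suf).getD pre.length 0 = t := by
  induction pre with
  | nil => rfl
  | cons p pre ih => simpa using ih

theorem set_mid (pre : List Int) (t v : Int) (suf : List Int) :
    (pre ++ t :: suf).set pre.length v = pre ++ v :: suf := by
  induction pre with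
  | nil => rfl
  | cons p pre ih => simpa using ih

theorem succ_mod (idx n : Nat) : (idx + 1) % n = ((idx % n) + 1) % n := by
  conv_lhs => rw [← Nat.div_add_mod idx n]
  rw [show n * (idx / n) + idx % n + 1 = (idx % n + 1) + (idx / n) * n by ring,
    Nat.add_mul_mod_self_right]

theorem exists_hit (idx n r : Nat) (hn : 0 < n) (hr : r < n) (hle : n ≤ idx) :
    ∃ i, i < n ∧ (idx - 1 - i) % n = r := by
  have hdm := Nat.div_add_mod (idx - 1) n
  have hen : (idx - 1) % n < n := Nat.mod_lt _ hn
  obtain ⟨q, e, hen, hq⟩ : ∃ q e, e < n ∧ idx - 1 = n * q + e :=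
    ⟨(idx - 1) / n, (idx - 1) % n, hen, by omega⟩
  by_cases hre : r ≤ e
  · refine ⟨e - r, by omega, ?_⟩
    rw [show idx - 1 - (e - r) = r + n * q by omega, Nat.add_mul_mod_self_left,
      Nat.mod_eq_of_lt hr]
  · match q, hq with
    | 0, hq => exfalso; omega
    | q' + 1, hq =>
      have hms : n * (q' + 1) = n * q' + n := Nat.mul_succ n q'
      refine ⟨e + n - r, by omega, ?_⟩
      rw [show idx - 1 - (e + n - r) = r + n * q' by omega, Nat.add_mul_mod_self_left,
        Nat.mod_eq_of_lt hr]

theorem cntL_append (xs ys : List Int) : cntL (xs ++ ys) = cntL xs + cntL ys := by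
  simp [cntL, List.filter_append]

theorem cntL_eq_zero_of_getD (ft : List Int) (h : ∀ r, r < ft.length → ¬ 0 < ft.getD r 0) :
    cntL ft = 0 := by
  have h' : ∀ t ∈ ft, ¬ 0 < t := by
    intro t ht
    obtain ⟨r, hr, rfl⟩ := List.mem_iff_getElem.1 ht
    have : ft.getD r 0 = ft[r] := by
      simp [List.getD_eq_getElem?_getD, List.getElem?_eq_getElem hr]
    rw [← this]; exact h r hr
  simp [cntL, List.length_eq_zero_iff, List.filter_eq_nil_iff]
  intro t ht; have := h' t ht; omega

theorem fuel_eat (k : Int) (n z f : Nat) (hk0 : 0 ≤ k) (hzn : z ≤ n)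
    (h : (k + 1).toNat * (n + 1) + (n - z) + 1 ≤ f + 1) :
    (k - 1 + 1).toNat * (n + 1) + (n - 0) + 1 ≤ f := by
  have e1 : (k - 1 + 1).toNat = k.toNat := by omega
  have e2 : (k + 1).toNat = k.toNat + 1 := by omega
  rw [e1]; rw [e2] at h
  have e3 : (k.toNat + 1) * (n + 1) = k.toNat * (n + 1) + (n + 1) := by ring
  omega

theorem loopA_succ (menu : Nat) (ft : List Int) (k : Int) (idx z : Nat) (ans : Int) (f : Nat) :
    loopA menu ft k idx z ans (f + 1) =
      if k = -1 then ans + 1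
      else if z = menu then (-2 : Int) + 1
      else if 0 < ft.getD (idx % menu) 0 then
        loopA menu (ft.set (idx % menu) (ft.getD (idx % menu) 0 - 1)) (k - 1) (idx + 1) 0
          ((idx % menu : Nat) : Int) f
      else loopA menu ft k (idx + 1) (z + 1) ans f := rfl

theorem lemA (fuel : Nat) : ∀ (n : Nat) (pre suf : List Int) (k : Int) (idx z : Nat) (ans : Int),
    n = (pre ++ suf).length → 0 < n → idx % n = pre.length → 0 ≤ k →
    z ≤ n → z ≤ idx →
    (∀ i, i < z → ¬ 0 < (pre ++ suf).getD ((idx - 1 - i) % n) 0) →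
    (k + 1).toNat * (n + 1) + (n - z) + 1 ≤ fuel →
    loopA n (pre ++ suf) k idx z ans fuel =
      match Q suf k with
      | .inl o => ((pre.length + o : Nat) : Int) + 1
      | .inr (us, k') => M0b (pre ++ us) k' := by
  induction fuel using Nat.strong_induction_on with
  | _ fuel ih =>
    intro n pre suf k idx z ans hnft hn hidx hk hzn hzidx hinv hfuel
    match fuel, hfuel with
    | f + 1, hfuel =>
    have hkm1 : ¬ (k = -1) := by omega
    by_cases hz : z = n
    · -- z_count == menu: every entry is nonpositive, both sides give -1
      have hall : ∀ r, r < (pre ++ suf).length → ¬ 0 < (pre ++ suf).getD r 0 := by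
        intro r hr
        obtain ⟨i, hi, hir⟩ := exists_hit idx n r hn (hnft ▸ hr) (by omega)
        have := hinv i (by omega)
        rwa [hir] at this
      have hc0 : cntL (pre ++ suf) = 0 := cntL_eq_zero_of_getD _ hall
      have hcsuf : cntL suf = 0 := by have := cntL_append pre suf; omega
      have hQ : Q suf k = .inr (suf, k) := by
        rw [Q_char suf k hk]
        have h1 : ¬ k < (cntL suf : Int) := by omega
        rw [if_neg h1, decL_of_nopos suf hcsuf, hcsuf]
        norm_num
      rw [loopA_succ, if_neg hkm1, if_pos hz, hQ]
      show (-2 : Int) + 1 = M0b (pre ++ suf) k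
      rw [M0b, M0_nopos _ _ _ hc0]; norm_num
    · -- one loop step
      have hjlt : pre.length < n := hidx ▸ Nat.mod_lt idx hn
      rcases suf with _ | ⟨t, suf'⟩
      · exfalso; simp at hnft; omega
      have hget : (pre ++ t :: suf').getD (idx % n) 0 = t := by
        rw [hidx]; exact getD_mid pre t suf'
      by_cases ht : 0 < t
      · -- eat the current dish
        have hset : (pre ++ t :: suf').set (idx % n) (t - 1) = pre ++ (t - 1) :: suf' := by
          rw [hidx]; exact set_mid pre t (t - 1) suf'
        rw [loopA_succ, if_neg hkm1, if_neg hz, hget, if_pos ht, hset]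
        by_cases hk0 : k = 0
        · -- last second: the next check k == -1 returns answer+1
          subst hk0
          match f, (show 1 ≤ f by omega) with
          | f' + 1, _ =>
          rw [loopA_succ, if_pos (by norm_num)]
          have hQ : Q (t :: suf') 0 = .inl 0 := by simp [Q, ht]
          rw [hQ, hidx]
          simp
        · -- k ≥ 1: continue with the next index
          have hk1 : 0 ≤ k - 1 := by omega
          have hQ : Q (t :: suf') k = (match Q suf' (k - 1) with
              | .inl o => .inl (o + 1)
              | .inr (us, k') => .inr ((t - 1) :: us, k')) := by
            simp [Q, ht, hk0]
          rcases suf' with _ | ⟨u, rest⟩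
          · -- pass boundary: wrap to index 0
            have hmod : (idx + 1) % n = 0 := by
              rw [succ_mod, hidx, show pre.length + 1 = n by simp at hnft; omega,
                Nat.mod_self]
            have := ih f (by omega) n [] (pre ++ [t - 1]) (k - 1) (idx + 1) 0
              ((idx % n : Nat) : Int) (by simp at hnft ⊢; omega) hn
              (by simpa using hmod) hk1 (by omega) (by omega)
              (by intro i hi; omega) (fuel_eat k n z f hk hzn hfuel)
            simp only [List.nil_append] at this
            rw [this]
            have hQ1 : Q [t] k = .inr ([t - 1], k - 1) := by simp [Q, ht, hk0]
            rw [hQ1]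
            show _ = M0b (pre ++ [t - 1]) (k - 1)
            rw [← Q_to_M0b (pre ++ [t - 1]) (k - 1) hk1]
            rcases hQq : Q (pre ++ [t - 1]) (k - 1) with o | ⟨us, k'⟩ <;> simp [hQq]
          · -- still inside the pass
            have hmod : (idx + 1) % n = pre.length + 1 := by
              rw [succ_mod, hidx, Nat.mod_eq_of_lt (by simp at hnft; omega)]
            have := ih f (by omega) n (pre ++ [t - 1]) (u :: rest) (k - 1) (idx + 1) 0
              ((idx % n : Nat) : Int) (by simp at hnft ⊢; omega) hn
              (by simpa using hmod) hk1 (by omega) (by omega)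
              (by intro i hi; omega) (fuel_eat k n z f hk hzn hfuel)
            rw [show (pre ++ [t - 1]) ++ u :: rest = pre ++ (t - 1) :: u :: rest by simp] at this
            rw [this, hQ]
            rcases hQ2 : Q (u :: rest) (k - 1) with o | ⟨us, k'⟩
            · simp only [hQ2]
              have : (pre ++ [t - 1]).length + o = pre.length + (o + 1) := by simp; omega
              rw [this]
            · simp only [hQ2]
              rw [show pre ++ (t - 1) :: us = (pre ++ [t - 1]) ++ us by simp]
      · -- skip a nonpositive dish
        rw [loopA_succ, if_neg hkm1, if_neg hz, hget, if_neg ht]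
        have hQ : Q (t :: suf') k = (match Q suf' k with
            | .inl o => .inl (o + 1)
            | .inr (us, k') => .inr (t :: us, k')) := by
          simp [Q, ht]
        have hinv' : ∀ i, i < z + 1 →
            ¬ 0 < (pre ++ t :: suf').getD ((idx + 1 - 1 - i) % n) 0 := by
          intro i hi
          rcases i with _ | i'
          · simpa [hidx, hget] using (by rw [hget]; exact ht :
              ¬ 0 < (pre ++ t :: suf').getD (idx % n) 0)
          · have h3 : idx + 1 - 1 - (i' + 1) = idx - 1 - i' := by omega
            rw [h3]
            exact hinv i' (by omega)
        rcases suf' with _ | ⟨u, rest⟩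
        · have hmod : (idx + 1) % n = 0 := by
            rw [succ_mod, hidx, show pre.length + 1 = n by simp at hnft; omega, Nat.mod_self]
          have := ih f (by omega) n [] (pre ++ [t]) k (idx + 1) (z + 1) ans
            (by simp at hnft ⊢; omega) hn (by simpa using hmod) hk (by omega) (by omega)
            (by intro i hi; have := hinv' i hi; simpa using this)
            (by omega)
          simp only [List.nil_append] at this
          rw [this]
          have hQ1 : Q [t] k = .inr ([t], k) := by simp [Q, ht]
          rw [hQ1]
          show _ = M0b (pre ++ [t]) k
          rw [← Q_to_M0b (pre ++ [t]) k hk]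
          rcases hQq : Q (pre ++ [t]) k with o | ⟨us, k'⟩ <;> simp [hQq]
        · have hmod : (idx + 1) % n = pre.length + 1 := by
            rw [succ_mod, hidx, Nat.mod_eq_of_lt (by simp at hnft; omega)]
          have := ih f (by omega) n (pre ++ [t]) (u :: rest) k (idx + 1) (z + 1) ans
            (by simp at hnft ⊢; omega) hn (by simpa using hmod) hk (by omega) (by omega)
            (by intro i hi; have := hinv' i hi; simpa using this)
            (by omega)
          rw [show (pre ++ [t]) ++ u :: rest = pre ++ t :: u :: rest by simp] at this
          rw [this, hQ]
          rcases hQ2 : Q (u :: rest) k with o | ⟨us, k'⟩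
          · simp only [hQ2]
            have : (pre ++ [t]).length + o = pre.length + (o + 1) := by simp; omega
            rw [this]
          · simp only [hQ2]
            rw [show pre ++ t :: us = (pre ++ [t]) ++ us by simp]

theorem loopB_succ (ft : List Int) (k : Int) (f : Nat) :
    loopB ft k (f + 1) =
      if ft.filter (fun t => decide (0 < t)) = [] then -1
      else if k < ((ft.filter (fun t => decide (0 < t))).length : Int) *
          ((PySem.List.min? (ft.filter (fun t => decide (0 < t))) (fun x => x)).getD 0) then
        (PySem.List.pyGet? ((PySem.List.enumerate ft).filterMap
            (fun p => if 0 < p.2 then some p.1 else none))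
          (PySem.Int.mod k ((ft.filter (fun t => decide (0 < t))).length : Int))).getD 0 + 1
      else
        loopB (ft.map (fun t => if 0 < t then
            t - ((PySem.List.min? (ft.filter (fun t => decide (0 < t))) (fun x => x)).getD 0)
          else t))
          (k - ((ft.filter (fun t => decide (0 < t))).length : Int) *
            ((PySem.List.min? (ft.filter (fun t => decide (0 < t))) (fun x => x)).getD 0)) f := rfl

-- positivity pattern facts for one bulk pass, under a positive lower bound ≥ 2
theorem cntL_decL (ft : List Int) (tm : Int) (h2 : 2 ≤ tm)
    (hmin : ∀ t ∈ ft, 0 < t → tm ≤ t) : cntL (decL ft) = cntL ft := by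
  induction ft with
  | nil => rfl
  | cons t ts ih =>
    have hmin' : ∀ t ∈ ts, 0 < t → tm ≤ t := fun x hx => hmin x (by simp [hx])
    by_cases ht : 0 < t
    · have h3 : tm ≤ t := hmin t (by simp) ht
      have e1 : cntL (decL (t :: ts)) = cntL (decL ts) + 1 := by
        simp [decL, cntL, ht, show (1 : Int) < t by omega]
      have e2 : cntL (t :: ts) = cntL ts + 1 := by simp [cntL, ht]
      rw [e1, e2, ih hmin']
    · have e1 : cntL (decL (t :: ts)) = cntL (decL ts) := by simp [decL, cntL, ht]
      have e2 : cntL (t :: ts) = cntL ts := by simp [cntL, ht]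
      rw [e1, e2, ih hmin']

theorem nthPosL_decL (ft : List Int) (tm : Int) (h2 : 2 ≤ tm)
    (hmin : ∀ t ∈ ft, 0 < t → tm ≤ t) : ∀ r, nthPosL (decL ft) r = nthPosL ft r := by
  induction ft with
  | nil => intro r; rfl
  | cons t ts ih =>
    intro r
    have hmin' : ∀ t ∈ ts, 0 < t → tm ≤ t := fun x hx => hmin x (by simp [hx])
    by_cases ht : 0 < t
    · have h3 : tm ≤ t := hmin t (by simp) ht
      have ht' : (1 : Int) < t := by omega
      by_cases hr : r = 0
      · simp [decL, nthPosL, ht, ht', hr]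
      · simp only [decL, List.map_cons, nthPosL, show (0 : Int) < t - 1 by omega, if_true,
          ht, hr, if_false]
        rw [show (List.map (fun t => if 0 < t then t - 1 else t) ts) = decL ts from rfl,
          ih hmin']
    · simp only [decL, List.map_cons, nthPosL, ht, if_false]
      rw [show (List.map (fun t => if 0 < t then t - 1 else t) ts) = decL ts from rfl,
        ih hmin']

theorem min_decL (ft : List Int) (tm : Int) (h2 : 2 ≤ tm)
    (hmin : ∀ t ∈ ft, 0 < t → tm ≤ t) :
    ∀ t ∈ decL ft, 0 < t → tm - 1 ≤ t := by
  intro t htm htpos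
  obtain ⟨x, hx, rfl⟩ := List.mem_map.1 htm
  by_cases hxp : 0 < x
  · have := hmin x hx hxp
    simp [hxp]; omega
  · rw [if_neg hxp] at htpos
    exact absurd htpos hxp

-- the remaining seconds are fewer than one full level: the answer is the (k % m + 1)-th alive dish
theorem small (u : Nat) : ∀ (ft : List Int) (k tm : Int), k.toNat = u →
    0 < cntL ft → (∀ t ∈ ft, 0 < t → tm ≤ t) → 0 ≤ k → k < (cntL ft : Int) * tm →
    M0b ft k = (nthPosL ft ((k % (cntL ft : Int)).toNat) : Int) + 1 := by
  induction u using Nat.strong_induction_on with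
  | _ u ih =>
    intro ft k tm hku hc hmin hk hlt
    by_cases hkm : k < (cntL ft : Int)
    · rw [M0b_unfold ft k hk, (any_iff_cntL ft).2 (by omega), if_pos rfl, Q_char ft k hk,
        if_pos hkm]
      show (nthPosL ft k.toNat : Int) + 1 = _
      rw [Int.emod_eq_of_lt hk hkm]
    · have hcnt1 : (1 : Int) ≤ (cntL ft : Int) := by exact_mod_cast hc
      have htm2 : 2 ≤ tm := by nlinarith
      rw [M0b_unfold ft k hk, (any_iff_cntL ft).2 (by omega), if_pos rfl, Q_char ft k hk,
        if_neg hkm]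
      show M0b (decL ft) (k - (cntL ft : Int)) = _
      have hk' : 0 ≤ k - (cntL ft : Int) := by omega
      have hlt' : k - (cntL ft : Int) < (cntL (decL ft) : Int) * (tm - 1) := by
        rw [cntL_decL ft tm htm2 hmin]
        have : (cntL ft : Int) * tm = (cntL ft : Int) * (tm - 1) + (cntL ft : Int) := by ring
        omega
      have := ih (k - (cntL ft : Int)).toNat (by omega) (decL ft) (k - (cntL ft : Int))
        (tm - 1) rfl (by rw [cntL_decL ft tm htm2 hmin]; exact hc)
        (min_decL ft tm htm2 hmin) hk' hlt'
      rw [this, cntL_decL ft tm htm2 hmin,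
        nthPosL_decL ft tm htm2 hmin, Int.sub_emod_right]

-- whole levels can be removed in bulk
theorem level (u : Nat) : ∀ (ft : List Int) (k tm : Int), tm.toNat = u → 1 ≤ tm →
    0 < cntL ft → (∀ t ∈ ft, 0 < t → tm ≤ t) → (cntL ft : Int) * tm ≤ k →
    M0b ft k = M0b (ft.map (fun t => if 0 < t then t - tm else t))
      (k - (cntL ft : Int) * tm) := by
  induction u using Nat.strong_induction_on with
  | _ u ih =>
    intro ft k tm hu h1 hc hmin hge
    have hcnt1 : (1 : Int) ≤ (cntL ft : Int) := by exact_mod_cast hc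
    have hk : 0 ≤ k := by nlinarith
    have hkm : ¬ k < (cntL ft : Int) := by nlinarith
    have hstep : M0b ft k = M0b (decL ft) (k - (cntL ft : Int)) := by
      rw [M0b_unfold ft k hk, (any_iff_cntL ft).2 (by omega), if_pos rfl, Q_char ft k hk,
        if_neg hkm]
    by_cases htm1 : tm = 1
    · subst htm1
      have hm1 : (cntL ft : Int) * 1 = (cntL ft : Int) := by ring
      rw [hstep, hm1]
      rfl
    · have htm2 : 2 ≤ tm := by omega
      rw [hstep]
      have hrec := ih (tm - 1).toNat (by omega) (decL ft) (k - (cntL ft : Int)) (tm - 1)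
        rfl (by omega) (by rw [cntL_decL ft tm htm2 hmin]; exact hc)
        (min_decL ft tm htm2 hmin)
        (by rw [cntL_decL ft tm htm2 hmin]
            have : (cntL ft : Int) * tm = (cntL ft : Int) * (tm - 1) + (cntL ft : Int) := by
              ring
            omega)
      rw [hrec, cntL_decL ft tm htm2 hmin]
      congr 1
      · unfold decL
        rw [List.map_map]
        refine List.map_congr_left ?_
        intro t htmem
        by_cases htp : 0 < t
        · have h3 : tm ≤ t := hmin t htmem htp
          have h4 : (1 : Int) < t := by omega
          simp only [Function.comp_apply, htp, if_true, show (0 : Int) < t - 1 by omega]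
          omega
        · simp [Function.comp, htp]
      · ring

theorem eIdx_get (ts : List Int) : ∀ (s : Int) (r : Nat), r < cntL ts →
    ((PySem.List.enumerate ts s).filterMap
        (fun p => if 0 < p.2 then some p.1 else none))[r]? =
      some (s + (nthPosL ts r : Int)) := by
  induction ts with
  | nil => intro s r hr; simp [cntL] at hr
  | cons t ts ih =>
    intro s r hr
    rw [PySem.List.enumerate_cons]
    by_cases ht : 0 < t
    · rcases r with _ | r'
      · simp [ht, nthPosL]
      · have hr' : r' < cntL ts := by
          have : cntL (t :: ts) = cntL ts + 1 := by simp [cntL, ht]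
          omega
        have := ih (s + 1) r' hr'
        simp only [List.filterMap_cons, ht, if_true, List.getElem?_cons_succ, this,
          nthPosL]
        congr 1
        push_cast
        ring
    · have hr' : r < cntL ts := by
        have : cntL (t :: ts) = cntL ts := by simp [cntL, ht]
        omega
      have := ih (s + 1) r hr'
      simp only [List.filterMap_cons, ht, if_false, this, nthPosL]
      congr 1
      push_cast
      ring

theorem posS_subL (ft : List Int) (tm : Int) (htm : 0 < tm)
    (hmin : ∀ t ∈ ft, 0 < t → tm ≤ t) :
    posS (ft.map (fun t => if 0 < t then t - tm else t)) + cntL ft * tm.toNat = posS ft := by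
  induction ft with
  | nil => simp [posS, cntL]
  | cons t ts ih =>
    have hmin' : ∀ t ∈ ts, 0 < t → tm ≤ t := fun x hx => hmin x (by simp [hx])
    have ihh := ih hmin'
    by_cases ht : 0 < t
    · have h3 : tm ≤ t := hmin t (by simp) ht
      have e1 : posS ((t :: ts).map (fun t => if 0 < t then t - tm else t))
          = (t - tm).toNat + posS (ts.map (fun t => if 0 < t then t - tm else t)) := by
        simp [posS, ht]
      have e2 : cntL (t :: ts) = cntL ts + 1 := by simp [cntL, ht]
      have e3 : posS (t :: ts) = t.toNat + posS ts := by simp [posS]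
      rw [e1, e2, e3]
      have e4 : (cntL ts + 1) * tm.toNat = cntL ts * tm.toNat + tm.toNat := by ring
      omega
    · have e1 : posS ((t :: ts).map (fun t => if 0 < t then t - tm else t))
          = t.toNat + posS (ts.map (fun t => if 0 < t then t - tm else t)) := by
        simp [posS, ht]
      have e2 : cntL (t :: ts) = cntL ts := by simp [cntL, ht]
      have e3 : posS (t :: ts) = t.toNat + posS ts := by simp [posS]
      rw [e1, e2, e3]
      omega

theorem lemB (fuel : Nat) : ∀ (ft : List Int) (k : Int), 0 ≤ k → posS ft + 1 ≤ fuel →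
    loopB ft k fuel = M0b ft k := by
  induction fuel using Nat.strong_induction_on with
  | _ fuel ih =>
    intro ft k hk hfuel
    match fuel, hfuel with
    | f + 1, hfuel =>
    rw [loopB_succ]
    by_cases halive : ft.filter (fun t => decide (0 < t)) = []
    · have hc0 : cntL ft = 0 := by simp [cntL, halive]
      rw [if_pos halive, M0b, M0_nopos _ _ _ hc0]
    · rw [if_neg halive]
      have hc : 0 < cntL ft := by
        rcases Nat.eq_zero_or_pos (cntL ft) with h0 | h1
        · exfalso; apply halive; simpa [cntL, List.length_eq_zero_iff] using h0
        · exact h1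
      obtain ⟨tm, htm⟩ : ∃ tm, PySem.List.min? (ft.filter (fun t => decide (0 < t)))
          (fun x => x) = some tm := by
        rcases hmm : PySem.List.min? (ft.filter (fun t => decide (0 < t))) (fun x => x) with
          _ | tm
        · exact absurd ((PySem.List.min?_eq_none_iff _ _).1 hmm) halive
        · exact ⟨tm, rfl⟩
      have htmem : tm ∈ ft.filter (fun t => decide (0 < t)) := PySem.List.min?_mem htm
      have htmpos : 0 < tm := by
        have hh := List.mem_filter.mp htmem
        simpa using hh.2
      have hmin : ∀ t ∈ ft, 0 < t → tm ≤ t := by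
        intro t htf htp
        exact PySem.List.min?_isMin htm t (List.mem_filter.2 ⟨htf, by simpa using htp⟩)
      have hmlen : ((ft.filter (fun t => decide (0 < t))).length : Int) = (cntL ft : Int) := by
        simp [cntL]
      rw [htm]
      simp only [Option.getD_some, hmlen]
      by_cases hcase : k < (cntL ft : Int) * tm
      · rw [if_pos hcase]
        have hcpos : (0 : Int) < (cntL ft : Int) := by exact_mod_cast hc
        have hmod : PySem.Int.mod k (cntL ft : Int) = k % (cntL ft : Int) :=
          PySem.Int.mod_eq_emod_of_pos hcpos
        have hr0 : 0 ≤ k % (cntL ft : Int) := Int.emod_nonneg k (by omega)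
        have hr1 : k % (cntL ft : Int) < (cntL ft : Int) := Int.emod_lt_of_pos k hcpos
        have hrn : (k % (cntL ft : Int)).toNat < cntL ft := by omega
        have hget := eIdx_get ft 0 ((k % (cntL ft : Int)).toNat) hrn
        rw [hmod, PySem.List.pyGet?_of_nonneg _ hr0, hget]
        rw [small k.toNat ft k tm rfl hc hmin hk hcase]
        simp
      · rw [if_neg hcase]
        have hge : (cntL ft : Int) * tm ≤ k := by omega
        have hps := posS_subL ft tm htmpos hmin
        have hda : 0 < cntL ft * tm.toNat := by
          have : 0 < tm.toNat := by omega
          positivity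
        have hrec := ih f (by omega) (ft.map (fun t => if 0 < t then t - tm else t))
          (k - (cntL ft : Int) * tm) (by omega) (by omega)
        rw [hrec, ← level tm.toNat ft k tm rfl (by omega) hc hmin hge]

theorem posFuel_eq (ft : List Int) : posFuel ft = posS ft + 1 := by
  unfold posFuel posS
  congr 1
  rw [List.sum_eq_foldl, List.foldl_map]

theorem solution_alt_eq_M0b (ft : List Int) (k : Int) (hk : 0 ≤ k) :
    solution_alt ft k = M0b ft k := by
  unfold solution_alt
  rw [posFuel_eq]
  exact lemB (posS ft + 1) ft k hk (le_refl _)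

theorem solution_eq_M0b (ft : List Int) (k : Int) (hk : 0 ≤ k) :
    solution ft k = M0b ft k := by
  rcases ft with _ | ⟨t, ts⟩
  · show loopA 0 [] k 0 0 0 (((k + 1).toNat + 0 + 1) * (0 + 1) + 0 + 1) = M0b [] k
    rw [loopA_succ, if_neg (by omega : ¬ k = -1), if_pos rfl]
    show (-2 : Int) + 1 = M0 (0 + 1) [] k
    rw [M0_nopos 0 [] k rfl]
    norm_num
  · have hn : 0 < (t :: ts).length := by simp
    have hA := lemA (((k + 1).toNat + (t :: ts).foldl (fun s t => s + t.toNat) 0 + 1) *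
        ((t :: ts).length + 1) + (t :: ts).length + 1)
      (t :: ts).length [] (t :: ts) k 0 0 0 (by simp) hn (by simp) hk (by omega) (by omega)
      (fun i hi => absurd hi (by omega))
      (by
        have hexp : ((k + 1).toNat + (t :: ts).foldl (fun s t => s + t.toNat) 0 + 1) *
            ((t :: ts).length + 1)
            = (k + 1).toNat * ((t :: ts).length + 1) +
              ((t :: ts).foldl (fun s t => s + t.toNat) 0 + 1) * ((t :: ts).length + 1) := by
          ring
        omega)
    simp only [List.nil_append] at hA
    unfold solution
    rw [hA, ← Q_to_M0b (t :: ts) k hk]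
    rcases hQq : Q (t :: ts) k with o | ⟨us, k'⟩ <;> simp [hQq]

-- ===== VERDICT (by name: the statement is the Claim_ definition above) =====
theorem solution_spec : Claim_equal_solution := by
  unfold Claim_equal_solution Spec_solution Pre_solution
  intro food_times k _ hk
  rw [solution_eq_M0b food_times k hk, solution_alt_eq_M0b food_times k hk]
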